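-- pv_equiv track=rewrite | github.com/andniz/moviesAPI | movies/utils.py | rank_movies_by_comments
-- ===== SOURCE A (Python) =====
-- def rank_movies_by_comments(movies_list):
--     # movies_list: a list of dicts with movie_id and total_comments
--     movies_list = sorted(movies_list, key=lambda m: m['total_comments'], reverse=True)
--     rank = 0
--     previous_comments = float('inf')
--     for movie in movies_list:
--         if movie['total_comments'] < previous_comments:
--             rank += 1
--         movie['rank'] = rank
--         previous_comments = movie['total_comments']
--     return movies_list
-- ===== SOURCE B (Python) =====
-- def rank_movies_by_comments(movies_list):
--     # movies_list: a list of dicts with movie_id and total_comments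
--     movies_list = sorted(movies_list, key=lambda m: m['total_comments'], reverse=True)
--     rank_map = {c: i + 1 for i, c in enumerate(dict.fromkeys(m['total_comments'] for m in movies_list))}
--     for movie in movies_list:
--         movie['rank'] = rank_map[movie['total_comments']]
--     return movies_list
-- ===== Notes on version B (the rewrite author's own statement) =====
-- stated objective: alternative
-- what changed: Replaces A's single pass with a running previous_comments/rank accumulator by two passes: first build a dense-rank table mapping each distinct comment count (in sorted order) to its 1-based rank, then assign each movie's rank by table lookup.
import Mathlib
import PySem

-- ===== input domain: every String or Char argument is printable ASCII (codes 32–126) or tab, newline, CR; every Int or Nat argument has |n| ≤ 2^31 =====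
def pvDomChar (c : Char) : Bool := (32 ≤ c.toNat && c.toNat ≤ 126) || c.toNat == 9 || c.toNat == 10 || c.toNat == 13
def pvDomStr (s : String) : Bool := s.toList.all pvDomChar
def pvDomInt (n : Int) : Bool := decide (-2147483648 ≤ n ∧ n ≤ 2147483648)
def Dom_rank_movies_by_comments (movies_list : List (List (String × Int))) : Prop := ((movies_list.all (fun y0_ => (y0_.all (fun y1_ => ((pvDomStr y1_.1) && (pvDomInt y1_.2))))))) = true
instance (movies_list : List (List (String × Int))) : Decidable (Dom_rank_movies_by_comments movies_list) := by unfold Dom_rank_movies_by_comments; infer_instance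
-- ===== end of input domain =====

-- B replaces A's running previous_comments/rank accumulator with a precomputed dense-rank table
-- (distinct count -> 1-based rank) and a lookup pass (objective: alternative decomposition).
-- Both A and B mutate the argument dicts in place in Python; the equivalence proved here is about the return value.

-- ===== PORT A =====
-- m['total_comments'] — total under Pre_ (the key is present there); 0 is never read inside Pre_
def pvTC (m : List (String × Int)) : Int := (PySem.Dict.mk m).getD "total_comments" 0

-- the body of A's for-loop: state = (rank, previous_comments (none = float('inf')), output so far)
def pvStepA (st : Int × Option Int × List (List (String × Int))) (movie : List (String × Int)) :
    Int × Option Int × List (List (String × Int)) :=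
  let rank : Int :=
    if (match st.2.1 with | none => true | some p => decide (pvTC movie < p)) then st.1 + 1 else st.1
  (rank, some (pvTC movie), st.2.2 ++ [((PySem.Dict.mk movie).insert "rank" rank).items])

def rank_movies_by_comments (movies_list : List (List (String × Int))) : List (List (String × Int)) :=
  let s := PySem.List.sorted movies_list (fun m => pvTC m) true
  (s.foldl pvStepA (0, none, [])).2.2

-- ===== PORT B =====
-- {c: i + 1 for i, c in enumerate(dict.fromkeys(...))}
def pvRankMap (distinct : List Int) : PySem.Dict Int Int :=
  (PySem.List.enumerate distinct 0).foldl (fun d p => d.insert p.2 (p.1 + 1)) PySem.Dict.empty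

def rank_movies_by_comments_alt (movies_list : List (List (String × Int))) : List (List (String × Int)) :=
  let s := PySem.List.sorted movies_list (fun m => pvTC m) true
  let rank_map := pvRankMap (PySem.List.dedup (s.map pvTC))
  -- rank_map[movie['total_comments']]: the key is always present, so getD's 0 default is never read
  s.map (fun movie => ((PySem.Dict.mk movie).insert "rank" (rank_map.getD (pvTC movie) 0)).items)

-- ===== PRECONDITION & SPEC =====
-- Pre_ excludes exactly the inputs where a movie dict lacks the 'total_comments' key: there
-- Python A (and Python B) raise KeyError inside sorted().
def Pre_rank_movies_by_comments (movies_list : List (List (String × Int))) : Prop :=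
  ∀ m ∈ movies_list, (PySem.Dict.mk m).contains "total_comments" = true
instance (movies_list : List (List (String × Int))) : Decidable (Pre_rank_movies_by_comments movies_list) := by
  unfold Pre_rank_movies_by_comments; infer_instance
def pvWitness_rank_movies_by_comments : (List (List (String × Int))) :=
  [[("movie_id", 1), ("total_comments", 3)], [("movie_id", 2), ("total_comments", 7)], [("movie_id", 3), ("total_comments", 3)]]

def Spec_rank_movies_by_comments (movies_list : List (List (String × Int))) (out : List (List (String × Int))) : Prop := out = rank_movies_by_comments_alt movies_list
instance (movies_list : List (List (String × Int))) (out : List (List (String × Int))) : Decidable (Spec_rank_movies_by_comments movies_list out) := by unfold Spec_rank_movies_by_comments; infer_instance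

-- ===== CLAIM (what is proved, stated in full; the proofs are below) =====
def Claim_equal_rank_movies_by_comments : Prop := ∀ (movies_list : List (List (String × Int))), Dom_rank_movies_by_comments movies_list → Pre_rank_movies_by_comments movies_list → Spec_rank_movies_by_comments movies_list (rank_movies_by_comments movies_list)

-- ===== LEMMAS AND PROOFS =====

-- Set.add only appends
theorem pv_foldl_add_prefix (Y : List Int) : ∀ (s : List Int), ∃ u, Y.foldl PySem.Set.add s = s ++ u := by
  induction Y with
  | nil => intro s; exact ⟨[], by simp⟩
  | cons y Y ih =>
      intro s
      rcases ih (PySem.Set.add s y) with ⟨u, hu⟩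
      by_cases hy : y ∈ s
      · exact ⟨u, by simpa [List.foldl, PySem.Set.add_eq_ite, hy] using hu⟩
      · exact ⟨y :: u, by simpa [List.foldl, PySem.Set.add_eq_ite, hy] using hu⟩

theorem pv_index?_foldl_add_of_mem (Y : List Int) (s : List Int) (c : Int) (hc : c ∈ s) :
    PySem.List.index? (Y.foldl PySem.Set.add s) c = PySem.List.index? s c := by
  rcases pv_foldl_add_prefix Y s with ⟨u, hu⟩
  rw [hu, PySem.List.index?_append_of_mem _ hc]

theorem pv_nodup_foldl_add (Y : List Int) : ∀ (s : List Int), s.Nodup → (Y.foldl PySem.Set.add s).Nodup := by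
  induction Y with
  | nil => intro s hs; simpa using hs
  | cons y Y ih =>
      intro s hs
      refine ih _ ?_
      by_cases hy : y ∈ s
      · simpa [PySem.Set.add_eq_ite, hy] using hs
      · have hn : (s ++ [y]).Nodup := by
          rw [List.nodup_append]
          exact ⟨hs, List.nodup_singleton _, by intro a ha b hb heq; simp at hb; exact hy (hb ▸ heq ▸ ha)⟩
        simpa [PySem.Set.add_eq_ite, hy] using hn

-- lookups in the rank table: keys never inserted are untouched …
theorem pv_rankMap_getD_not_mem (D : List Int) : ∀ (s : Int) (d : PySem.Dict Int Int) (c : Int), c ∉ D →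
    ((PySem.List.enumerate D s).foldl (fun d p => d.insert p.2 (p.1 + 1)) d).getD c 0 = d.getD c 0 := by
  induction D with
  | nil => intro s d c _; simp [PySem.List.enumerate_nil]
  | cons x D ih =>
      intro s d c hc
      rw [PySem.List.enumerate_cons]
      simp only [List.foldl]
      rw [ih (s + 1) _ c (fun h => hc (List.mem_cons_of_mem _ h))]
      rw [PySem.Dict.getD_insert_of_ne _ _ _ (fun h => hc (by simp [h]))]

-- … and a key at position i in a duplicate-free list maps to s + i + 1
theorem pv_rankMap_getD (D : List Int) : ∀ (s : Int) (d : PySem.Dict Int Int) (c : Int) (i : Nat),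
    D.Nodup → PySem.List.index? D c = some i →
    ((PySem.List.enumerate D s).foldl (fun d p => d.insert p.2 (p.1 + 1)) d).getD c 0 = s + (i : Int) + 1 := by
  induction D with
  | nil => intro s d c i _ h; simp [PySem.List.index?_eq_idxOf?] at h
  | cons x D ih =>
      intro s d c i hnd hidx
      rw [PySem.List.enumerate_cons]
      simp only [List.foldl]
      by_cases hx : x = c
      · subst hx
        rw [PySem.List.index?_cons_self] at hidx
        obtain rfl : i = 0 := by simpa using hidx.symm
        have hxD : x ∉ D := (List.nodup_cons.mp hnd).1
        rw [pv_rankMap_getD_not_mem D (s + 1) _ x hxD]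
        simp [PySem.Dict.getD_insert_self]
      · rw [PySem.List.index?_cons_of_ne _ hx] at hidx
        rcases Option.map_eq_some_iff.mp hidx with ⟨j, hj, rfl⟩
        have := ih (s + 1) (d.insert x (s + 1)) c j (List.Nodup.of_cons hnd) hj
        rw [this]; push_cast; ring

-- the main loop invariant: on a descending count list, A's running (rank, prev) fold emits
-- exactly B's table lookups against the global dedup list
theorem pv_main (t : List (List (String × Int))) :
    ∀ (D : List Int) (prev : Option Int) (acc : List (List (String × Int))),
    (match prev with
      | none => D = []
      | some l => (∃ E, D = E ++ [l] ∧ l ∉ E) ∧ (∀ x ∈ D, l ≤ x) ∧ (∀ y ∈ t, pvTC y ≤ l)) →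
    D.Nodup →
    (t.map pvTC).Pairwise (fun a b => b ≤ a) →
    (t.foldl pvStepA ((D.length : Int), prev, acc)).2.2
      = acc ++ t.map (fun m =>
          ((PySem.Dict.mk m).insert "rank"
            ((pvRankMap ((t.map pvTC).foldl PySem.Set.add D)).getD (pvTC m) 0)).items) := by
  induction t with
  | nil => intro D prev acc _ _ _; simp
  | cons m t ih =>
      intro D prev acc hp hnd hs
      have hs2 : (∀ a ∈ t, pvTC a ≤ pvTC m) ∧ (t.map pvTC).Pairwise (fun a b => b ≤ a) := by
        simpa using hs
      have hs' := hs2.2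
      have hhead := hs2.1
      rcases hprev : prev with _ | l
      · -- prev = none (first iteration): D = []
        subst hprev
        have hD : D = [] := hp
        subst hD
        have hadd : PySem.Set.add ([] : List Int) (pvTC m) = [pvTC m] := by
          simp [PySem.Set.add]
        have hstep : pvStepA (((([] : List Int).length : Nat) : Int), none, acc) m
            = (((([pvTC m] : List Int).length : Nat) : Int), some (pvTC m),
               acc ++ [((PySem.Dict.mk m).insert "rank" 1).items]) := by
          simp [pvStepA]
        have hget : (pvRankMap ((t.map pvTC).foldl PySem.Set.add [pvTC m])).getD (pvTC m) 0 = 1 := by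
          have hidx : PySem.List.index? ((t.map pvTC).foldl PySem.Set.add [pvTC m]) (pvTC m)
              = some 0 := by
            rw [pv_index?_foldl_add_of_mem _ _ _ (by simp), PySem.List.index?_cons_self]
          have hnodup : ((t.map pvTC).foldl PySem.Set.add [pvTC m]).Nodup :=
            pv_nodup_foldl_add _ _ (by simp)
          have := pv_rankMap_getD _ 0 PySem.Dict.empty (pvTC m) 0 hnodup hidx
          simpa [pvRankMap] using this
        rw [List.foldl_cons, hstep,
          ih [pvTC m] (some (pvTC m)) _ ⟨⟨[], by simp, by simp⟩, by simp, hhead⟩ (by simp) hs']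
        simp only [List.map_cons, List.foldl_cons, hadd]
        rw [hget]
        simp
      · subst hprev
        rcases hp with ⟨⟨E, hDE, hlE⟩, hlle, hyle⟩
        have hcl : pvTC m ≤ l := hyle m (List.mem_cons_self)
        by_cases hlt : pvTC m < l
        · -- new distinct count: rank increments, the count is appended to the dedup prefix
          have hcD : pvTC m ∉ D := fun h => absurd (hlle _ h) (by omega)
          have hadd : PySem.Set.add D (pvTC m) = D ++ [pvTC m] := by
            rw [PySem.Set.add_eq_ite, if_neg hcD]
          have hstep : pvStepA (((D.length : Nat) : Int), some l, acc) m
              = ((((D ++ [pvTC m]).length : Nat) : Int), some (pvTC m),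
                 acc ++ [((PySem.Dict.mk m).insert "rank" ((D.length : Int) + 1)).items]) := by
            simp [pvStepA, hlt]
          have hget : (pvRankMap ((t.map pvTC).foldl PySem.Set.add (D ++ [pvTC m]))).getD (pvTC m) 0
              = (D.length : Int) + 1 := by
            have hidx : PySem.List.index? ((t.map pvTC).foldl PySem.Set.add (D ++ [pvTC m])) (pvTC m)
                = some D.length := by
              rw [pv_index?_foldl_add_of_mem _ _ _ (by simp),
                PySem.List.index?_append_singleton_self D _ hcD]
            have hnodup : ((t.map pvTC).foldl PySem.Set.add (D ++ [pvTC m])).Nodup := by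
              refine pv_nodup_foldl_add _ _ ?_
              rw [List.nodup_append]
              exact ⟨hnd, List.nodup_singleton _, by intro a ha b hb heq; simp at hb; exact hcD (hb ▸ heq ▸ ha)⟩
            have := pv_rankMap_getD _ 0 PySem.Dict.empty (pvTC m) D.length hnodup hidx
            simpa [pvRankMap] using this
          have hinv : ∀ x ∈ D ++ [pvTC m], pvTC m ≤ x := by
            intro x hx
            rcases List.mem_append.mp hx with hx | hx
            · exact le_of_lt (lt_of_lt_of_le hlt (hlle x hx))
            · simp at hx; omega
          rw [List.foldl_cons, hstep,
            ih (D ++ [pvTC m]) (some (pvTC m)) _ ⟨⟨D, rfl, hcD⟩, hinv, hhead⟩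
              (by rw [List.nodup_append]; exact ⟨hnd, List.nodup_singleton _, by intro a ha b hb heq; simp at hb; exact hcD (hb ▸ heq ▸ ha)⟩)
              hs']
          simp only [List.map_cons, List.foldl_cons, hadd]
          rw [hget]
          simp
        · -- repeated count: pvTC m = l, rank and dedup prefix unchanged
          have hceq : pvTC m = l := le_antisymm hcl (by omega)
          have hcD : pvTC m ∈ D := by rw [hDE, hceq]; simp
          have hadd : PySem.Set.add D (pvTC m) = D := by
            rw [PySem.Set.add_eq_ite, if_pos hcD]
          have hstep : pvStepA (((D.length : Nat) : Int), some l, acc) m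
              = (((D.length : Nat) : Int), some (pvTC m),
                 acc ++ [((PySem.Dict.mk m).insert "rank" ((D.length : Nat) : Int)).items]) := by
            simp [pvStepA, hlt]
          have hget : (pvRankMap ((t.map pvTC).foldl PySem.Set.add D)).getD (pvTC m) 0
              = ((D.length : Nat) : Int) := by
            have hidx : PySem.List.index? ((t.map pvTC).foldl PySem.Set.add D) (pvTC m)
                = some E.length := by
              rw [pv_index?_foldl_add_of_mem _ _ _ hcD, hDE, hceq,
                PySem.List.index?_append_singleton_self E _ hlE]
            have hnodup : ((t.map pvTC).foldl PySem.Set.add D).Nodup :=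
              pv_nodup_foldl_add _ _ hnd
            have := pv_rankMap_getD _ 0 PySem.Dict.empty (pvTC m) E.length hnodup hidx
            have hlen : ((D.length : Nat) : Int) = (E.length : Int) + 1 := by
              rw [hDE]; simp
            rw [hlen]
            simpa [pvRankMap] using this
          have hle' : ∀ y ∈ t, pvTC y ≤ pvTC m := hhead
          rw [List.foldl_cons, hstep,
            ih D (some (pvTC m)) _ ⟨⟨E, by rw [hDE, hceq], by rw [hceq]; exact hlE⟩,
              by rw [hceq]; exact hlle, hle'⟩ hnd hs']
          simp only [List.map_cons, List.foldl_cons, hadd]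
          rw [hget]
          simp

-- ===== VERDICT (by name: the statement is the Claim_ definition above) =====
theorem rank_movies_by_comments_spec : Claim_equal_rank_movies_by_comments := by
  intro movies_list _ _
  unfold Spec_rank_movies_by_comments rank_movies_by_comments rank_movies_by_comments_alt
  have hs : ((PySem.List.sorted movies_list (fun m => pvTC m) true).map pvTC).Pairwise
      (fun a b => b ≤ a) := by
    have := PySem.List.sorted_pairwise_rev (xs := movies_list) (key := fun m => pvTC m)
    exact List.pairwise_map.mpr this
  have := pv_main (PySem.List.sorted movies_list (fun m => pvTC m) true) [] none [] rfl (by simp) hs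
  simpa [PySem.List.dedup_eq_ofList, PySem.Set.ofList_eq_foldl] using this
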